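-- pv_equiv track=rewrite | github.com/dongminlee94/coding-practice | src/1946_Largest Number After Mutating Substring.py | maximumNumber2
-- ===== SOURCE A (Python) =====
-- from typing import List
--
-- def maximumNumber2(num: str, change: List[int]) -> str:
--     """
--     TC: O(N) / SC: O(N)
--     Runtime: 284 ms, faster than 66.52%
--     Memory Usage: 22.2 MB, less than 49.40%
--     """
--     num_list = list(num)
--     changed = False
--     for i in range(len(num_list)):
--         if change[int(num_list[i])] > int(num_list[i]):
--             num_list[i] = str(change[int(num_list[i])])
--             changed = True
--         elif changed == True and change[int(num_list[i])] < int(num_list[i]):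
--             break
--     return "".join(num_list)
-- ===== SOURCE B (Python) =====
-- from typing import List
--
-- def maximumNumber2(num: str, change: List[int]) -> str:
--     # Staged/splice approach: precompute the fully-mutated piece list, compute the
--     # mutation window's endpoints (first improving digit, first worsening digit after it),
--     # then assemble the answer as join(pieces[:e]) + num[e:].  No stateful scan.
--     pieces = [str(change[int(c)]) if change[int(c)] > int(c) else c for c in num]
--     s = next((i for i, c in enumerate(num) if change[int(c)] > int(c)), None)
--     if s is None:
--         return num
--     e = next((i for i in range(s, len(num)) if change[int(num[i])] < int(num[i])), len(num))
--     return "".join(pieces[:e]) + num[e:]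
-- ===== Notes on version B (the rewrite author's own statement) =====
-- stated objective: alternative
-- what changed: Replaces A's single stateful in-place scan with a 'changed' flag by a window-splice construction: precompute the fully-mutated piece list, compute the mutation window's two endpoints (first improving digit, first worsening digit after it), and assemble join(pieces[:e]) + num[e:].
-- outside the precondition, e.g. on maximumNumber2('21x', [0, 0, 3]): A returns '31x', B raises ValueError
import Mathlib
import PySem

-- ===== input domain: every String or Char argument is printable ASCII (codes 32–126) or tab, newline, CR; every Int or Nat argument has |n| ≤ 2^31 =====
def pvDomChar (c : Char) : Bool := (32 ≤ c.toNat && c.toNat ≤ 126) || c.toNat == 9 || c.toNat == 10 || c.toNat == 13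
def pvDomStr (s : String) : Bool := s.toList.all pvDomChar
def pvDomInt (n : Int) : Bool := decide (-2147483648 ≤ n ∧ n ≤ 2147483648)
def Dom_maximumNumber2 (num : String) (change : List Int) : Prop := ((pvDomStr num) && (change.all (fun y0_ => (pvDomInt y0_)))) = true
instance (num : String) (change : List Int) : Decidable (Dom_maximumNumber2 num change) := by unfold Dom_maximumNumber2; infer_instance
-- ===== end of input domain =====

-- B replaces A's single stateful in-place scan with a `changed` flag by a window-splice
-- construction: a fully-mutated piece list plus the window's two endpoints, then
-- join(pieces[:e]) + num[e:]; same value, no speed claim.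

-- int(c) for a one-character string c (0 is a dummy outside Pre_, where Python raises ValueError)
def pvToDigit (c : Char) : Int := (PySem.Int.ofStr? (String.ofList [c])).getD 0
-- change[d] (0 is a dummy outside Pre_, where Python raises IndexError)
def pvGet (change : List Int) (d : Int) : Int := (PySem.List.pyGet? change d).getD 0

-- ===== PORT A =====
-- A's for-loop over num_list with its `changed` flag; each element of the result list is one
-- (possibly multi-character) string of the Python list; `break` returns the rest unchanged.
def pvALoop (cs : List Char) (change : List Int) (changed : Bool) : List (List Char) :=
  match cs with
  | [] => []
  | c :: rest =>
    if pvToDigit c < pvGet change (pvToDigit c) then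
      PySem.Int.toChars (pvGet change (pvToDigit c)) :: pvALoop rest change true
    else if changed = true ∧ pvGet change (pvToDigit c) < pvToDigit c then
      [c] :: rest.map (fun x => [x])
    else
      [c] :: pvALoop rest change changed

-- "".join of the pieces is their concatenation
def maximumNumber2 (num : String) (change : List Int) : String :=
  String.ofList (pvALoop num.toList change false).flatten

-- ===== PORT B =====
-- B's piece for one character: str(change[d]) if change[d] > d else the character itself
def pvPiece (change : List Int) (c : Char) : List Char :=
  if pvToDigit c < pvGet change (pvToDigit c) then PySem.Int.toChars (pvGet change (pvToDigit c))
  else [c]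

def pvImp (change : List Int) (c : Char) : Bool := decide (pvToDigit c < pvGet change (pvToDigit c))
def pvWor (change : List Int) (c : Char) : Bool := decide (pvGet change (pvToDigit c) < pvToDigit c)

-- B: pieces list, start s = first improving index (none → num), end e = first worsening
-- index at or after s (default len), answer = join(pieces[:e]) + num[e:]
def maximumNumber2_alt (num : String) (change : List Int) : String :=
  let cs := num.toList
  let pieces := cs.map (pvPiece change)
  match cs.findIdx? (pvImp change) with
  | none => num
  | some s =>
    let e : Nat :=
      match (cs.drop s).findIdx? (pvWor change) with
      | some k => s + k
      | none => cs.length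
    String.ofList ((pieces.take e).flatten ++ cs.drop e)

-- ===== PRECONDITION & SPEC =====
-- Pre_: every character of num is a decimal digit whose value indexes change. This is exactly
-- where Python A returns, except that A can also return on a malformed SUFFIX shielded by an
-- early `break` (e.g. '21x' with change [0,0,3]); there B itself raises (it converts all
-- characters up front), so those inputs are excluded.
def Pre_maximumNumber2 (num : String) (change : List Int) : Prop :=
  num.toList.all (fun c => c.isDigit && decide (((c.toNat : Int) - 48) < change.length)) = true
instance (num : String) (change : List Int) : Decidable (Pre_maximumNumber2 num change) := by
  unfold Pre_maximumNumber2; infer_instance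

def pvWitness_maximumNumber2 : String × List Int := ("132", [9, 8, 5, 0, 8, 7, 6, 8, 9, 9])

def Spec_maximumNumber2 (num : String) (change : List Int) (out : String) : Prop := out = maximumNumber2_alt num change
instance (num : String) (change : List Int) (out : String) : Decidable (Spec_maximumNumber2 num change out) := by unfold Spec_maximumNumber2; infer_instance

-- ===== CLAIM (what is proved, stated in full; the proofs are below) =====
def Claim_equal_maximumNumber2 : Prop := ∀ (num : String) (change : List Int), Dom_maximumNumber2 num change → Pre_maximumNumber2 num change → Spec_maximumNumber2 num change (maximumNumber2 num change)

-- ===== LEMMAS AND PROOFS =====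

theorem flatten_map_singleton (cs : List Char) : (cs.map (fun x => [x])).flatten = cs := by
  induction cs with
  | nil => rfl
  | cons c rest ih => simp [ih]

-- once the flag is set, A's loop is: mutated pieces up to the first worsening index, rest verbatim
theorem aLoop_true_eq (cs : List Char) (change : List Int) :
    pvALoop cs change true =
      ((cs.map (pvPiece change)).take (((cs.findIdx? (pvWor change)).getD cs.length)))
        ++ (cs.drop ((cs.findIdx? (pvWor change)).getD cs.length)).map (fun x => [x]) := by
  induction cs with
  | nil => rfl
  | cons c rest ih =>
    simp only [pvALoop, List.map_cons, List.findIdx?_cons, pvWor, pvPiece]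
    by_cases hgt : pvToDigit c < pvGet change (pvToDigit c)
    · have hnw : ¬ pvGet change (pvToDigit c) < pvToDigit c := not_lt.mpr (le_of_lt hgt)
      simp only [hgt, hnw, decide_false, if_true, cond_false, ih, pvWor, pvPiece]
      cases h : rest.findIdx? (fun c => decide (pvGet change (pvToDigit c) < pvToDigit c)) with
      | none => simp [h]
      | some k => simp [h]
    · by_cases hlt : pvGet change (pvToDigit c) < pvToDigit c
      · simp [hgt, hlt]
      · simp only [hgt, hlt, decide_false, if_false, cond_false, and_false, ih, pvWor, pvPiece]
        cases h : rest.findIdx? (fun c => decide (pvGet change (pvToDigit c) < pvToDigit c)) with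
        | none => simp [h, hgt]
        | some k => simp [h, hgt]

-- with the flag down, A's loop copies up to the first improving index, then runs flag-up
theorem aLoop_false_split (cs : List Char) (change : List Int) :
    pvALoop cs change false =
      match cs.findIdx? (pvImp change) with
      | none => cs.map (fun x => [x])
      | some s => (cs.take s).map (fun x => [x]) ++ pvALoop (cs.drop s) change true := by
  induction cs with
  | nil => rfl
  | cons c rest ih =>
    by_cases hgt : pvToDigit c < pvGet change (pvToDigit c)
    · have hfi : (c :: rest).findIdx? (pvImp change) = some 0 := by
        simp [List.findIdx?_cons, pvImp, hgt]
      simp only [hfi]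
      simp [pvALoop, hgt]
    · have hA : pvALoop (c :: rest) change false = [c] :: pvALoop rest change false := by
        simp [pvALoop, hgt]
      rw [hA, ih]
      cases h : rest.findIdx? (pvImp change) with
      | none =>
        have hfi : (c :: rest).findIdx? (pvImp change) = none := by
          simp [List.findIdx?_cons, pvImp, hgt, h]
        simp [hfi, h]
      | some s =>
        have hfi : (c :: rest).findIdx? (pvImp change) = some (s + 1) := by
          simp [List.findIdx?_cons, pvImp, hgt, h]
        simp [hfi, h]

-- characters before the first improving index are their own piece
theorem piece_take_eq (cs : List Char) (change : List Int) (s : Nat)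
    (h : cs.findIdx? (pvImp change) = some s) :
    (cs.take s).map (pvPiece change) = (cs.take s).map (fun x => [x]) := by
  rw [List.findIdx?_eq_some_iff_getElem] at h
  obtain ⟨hs, _, hmin⟩ := h
  apply List.map_congr_left
  intro c hc
  rw [List.mem_take_iff_getElem] at hc
  obtain ⟨j, hj, rfl⟩ := hc
  have hnp := hmin j (by omega)
  simp only [pvImp, decide_eq_true_eq] at hnp
  simp [pvPiece, hnp]

-- the splice identity: prefix verbatim, window pieces, suffix verbatim
theorem splice_key (cs : List Char) (change : List Int) (s e' : Nat)
    (h : cs.findIdx? (pvImp change) = some s) :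
    cs.take s ++ ((((cs.drop s).map (pvPiece change)).take e').flatten ++ (cs.drop s).drop e')
    = ((cs.map (pvPiece change)).take (s + e')).flatten ++ cs.drop (s + e') := by
  have h1 : (cs.map (pvPiece change)).take (s + e')
      = (cs.take s).map (pvPiece change) ++ ((cs.drop s).map (pvPiece change)).take e' := by
    rw [List.take_add]
    congr 1
    · rw [List.map_take]
    · simp [List.map_drop]
  rw [h1, List.flatten_append, piece_take_eq _ _ _ h, flatten_map_singleton]
  have h2 : cs.drop (s + e') = (cs.drop s).drop e' := by
    rw [List.drop_drop, Nat.add_comm]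
  rw [h2, List.append_assoc]

-- ===== VERDICT (by name: the statement is the Claim_ definition above) =====
theorem maximumNumber2_spec : Claim_equal_maximumNumber2 := by
  intro num change _ _
  unfold Spec_maximumNumber2 maximumNumber2 maximumNumber2_alt
  rw [aLoop_false_split]
  cases h : num.toList.findIdx? (pvImp change) with
  | none => simp [h, flatten_map_singleton]
  | some s =>
    simp only [h]
    have hs : s < num.toList.length := by
      rw [List.findIdx?_eq_some_iff_getElem] at h; exact h.1
    rw [aLoop_true_eq]
    have he : (match (num.toList.drop s).findIdx? (pvWor change) with
        | some k => s + k
        | none => num.toList.length)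
        = s + ((num.toList.drop s).findIdx? (pvWor change)).getD (num.toList.drop s).length := by
      cases hk : (num.toList.drop s).findIdx? (pvWor change) with
      | none => simp only [Option.getD_none, List.length_drop]; omega
      | some k => simp
    rw [he]
    congr 1
    rw [List.flatten_append, flatten_map_singleton, List.flatten_append,
      flatten_map_singleton]
    exact splice_key num.toList change s _ h
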